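-- pv_equiv track=rewrite | github.com/cj81499/Advent-of-Code | advent/aoc2015/day25.py | code_at
-- ===== SOURCE A (Python) =====
-- FIRST_CODE = 20151125
--
-- def next_code(code):
--     return (code * 252533) % 33554393
--
-- def code_at(col, row):
--     code = FIRST_CODE
--     x, y = 1, 1
--
--     while not(x == col and y == row):
--         code = next_code(code)
--         if y == 1:
--             x, y = 1, x + 1
--         else:
--             x, y = x + 1, y - 1
--     return code
-- ===== SOURCE B (Python) =====
-- FIRST_CODE = 20151125
--
-- def code_at(col, row):
--     d = col + row - 2
--     index = d * (d + 1) // 2 + col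
--     return FIRST_CODE * pow(252533, index - 1, 33554393) % 33554393
-- ===== Notes on version B (the rewrite author's own statement) =====
-- stated objective: faster
-- what changed: Replaced the diagonal-walking loop by the closed-form triangular index plus modular exponentiation by squaring.
import Mathlib
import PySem

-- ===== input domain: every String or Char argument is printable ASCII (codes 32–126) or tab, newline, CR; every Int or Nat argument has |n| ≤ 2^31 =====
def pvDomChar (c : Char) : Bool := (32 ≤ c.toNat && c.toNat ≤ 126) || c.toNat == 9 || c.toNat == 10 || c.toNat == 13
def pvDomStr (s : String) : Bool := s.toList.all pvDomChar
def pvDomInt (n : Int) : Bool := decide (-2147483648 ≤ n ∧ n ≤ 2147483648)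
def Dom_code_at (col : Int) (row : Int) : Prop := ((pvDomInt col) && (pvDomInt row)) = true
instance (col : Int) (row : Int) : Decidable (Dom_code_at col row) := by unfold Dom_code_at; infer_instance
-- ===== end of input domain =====

-- B replaces A's step-by-step diagonal walk with the closed-form triangular index
-- and modular exponentiation by squaring (objective: faster).

-- ===== PORT A =====
def pvNextCode (code : Int) : Int := PySem.Int.mod (code * 252533) 33554393

-- A's while loop; the fuel only makes the recursion total (it never runs out when
-- Pre_ holds; outside Pre_ the Python loop never terminates).
def pvCodeLoop (fuel : Nat) (code : Int) (x : Int) (y : Int) (col : Int) (row : Int) : Int :=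
  if x = col ∧ y = row then code
  else
    match fuel with
    | 0 => code
    | Nat.succ n =>
      let code' := pvNextCode code
      if y = 1 then pvCodeLoop n code' 1 (x + 1) col row
      else pvCodeLoop n code' (x + 1) (y - 1) col row

def code_at (col : Int) (row : Int) : Int :=
  pvCodeLoop ((col + row).toNat * (col + row).toNat) 20151125 1 1 col row

-- ===== PORT B =====
-- Python's built-in pow(b, e, m): exponentiation by squaring modulo m (0 < m, 0 ≤ e).
def pvPowMod (b : Int) (e : Nat) (m : Int) : Int :=
  if _h : e = 0 then PySem.Int.mod 1 m
  else
    let half := pvPowMod b (e / 2) m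
    if e % 2 = 0 then PySem.Int.mod (half * half) m
    else PySem.Int.mod (PySem.Int.mod (half * half) m * PySem.Int.mod b m) m
decreasing_by exact Nat.div_lt_self (Nat.pos_of_ne_zero _h) (by omega)

def code_at_alt (col : Int) (row : Int) : Int :=
  let d := col + row - 2
  let index := PySem.Int.floordiv (d * (d + 1)) 2 + col
  -- (index - 1).toNat is exact: inside Pre_ the exponent index - 1 is nonnegative
  PySem.Int.mod (20151125 * pvPowMod 252533 (index - 1).toNat 33554393) 33554393

-- ===== PRECONDITION & SPEC =====
-- A's while loop only terminates on cells of the infinite table, i.e. col ≥ 1 and row ≥ 1;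
-- on every other input A diverges (returns nothing), so exactly those inputs are excluded.
def Pre_code_at (col : Int) (row : Int) : Prop := 1 ≤ col ∧ 1 ≤ row
instance (col : Int) (row : Int) : Decidable (Pre_code_at col row) := by unfold Pre_code_at; infer_instance
def pvWitness_code_at : Int × Int := (3, 4)

def Spec_code_at (col : Int) (row : Int) (out : Int) : Prop := out = code_at_alt col row
instance (col : Int) (row : Int) (out : Int) : Decidable (Spec_code_at col row out) := by unfold Spec_code_at; infer_instance

-- ===== CLAIM (what is proved, stated in full; the proofs are below) =====
def Claim_equal_code_at : Prop := ∀ (col : Int) (row : Int), Dom_code_at col row → Pre_code_at col row → Spec_code_at col row (code_at col row)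

-- ===== LEMMAS AND PROOFS =====

theorem pvmodM (a : Int) : PySem.Int.mod a 33554393 = a % 33554393 :=
  PySem.Int.mod_eq_emod_of_pos (by norm_num)

-- k-fold application of pvNextCode, innermost first (the loop's code evolution).
def pvIter (k : Nat) (c : Int) : Int :=
  match k with
  | 0 => c
  | Nat.succ n => pvIter n (pvNextCode c)

-- diagonal index of cell (x, y) (1-based); A visits cells in increasing pvIdx order.
def pvIdx (x : Int) (y : Int) : Int := (x + y - 2) * (x + y - 1) / 2 + x

theorem pvIdx_double (x y : Int) : 2 * pvIdx x y = (x + y - 2) * (x + y - 1) + 2 * x := by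
  obtain ⟨k, hk⟩ : Even ((x + y - 2) * ((x + y - 2) + 1)) := Int.even_mul_succ_self (x + y - 2)
  have hk2 : (x + y - 2) * (x + y - 1) = k + k := by
    rw [show x + y - 1 = (x + y - 2) + 1 by ring]; exact hk
  unfold pvIdx
  rw [hk2]
  omega

theorem pvIdx_inj {x y c r : Int} (hx : 1 ≤ x) (hy : 1 ≤ y) (hc : 1 ≤ c) (hr : 1 ≤ r)
    (h : pvIdx x y = pvIdx c r) : x = c ∧ y = r := by
  have hxy := pvIdx_double x y
  have hcr := pvIdx_double c r
  have h2 : (x + y - 2) * (x + y - 1) + 2 * x = (c + r - 2) * (c + r - 1) + 2 * c := by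
    linarith
  have hsum : x + y = c + r := by
    by_contra hne
    rcases lt_or_gt_of_ne hne with hlt | hgt
    · nlinarith [h2, hlt, hx, hy, hc, hr]
    · nlinarith [h2, hgt, hx, hy, hc, hr]
  have hpq : (x + y - 2) * (x + y - 1) = (c + r - 2) * (c + r - 1) := by rw [hsum]
  constructor
  · linarith
  · omega

theorem pvIdx_step_col (x : Int) : pvIdx 1 (x + 1) = pvIdx x 1 + 1 := by
  have h1 := pvIdx_double 1 (x + 1)
  have h2 := pvIdx_double x 1
  nlinarith [h1, h2]

theorem pvIdx_step_diag (x y : Int) : pvIdx (x + 1) (y - 1) = pvIdx x y + 1 := by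
  have h1 := pvIdx_double (x + 1) (y - 1)
  have h2 := pvIdx_double x y
  nlinarith [h1, h2]

-- main loop invariant: with k steps left to the target and enough fuel, the loop
-- returns the k-fold next_code of the current code.
theorem pvCodeLoop_eq (col row : Int) (hc : 1 ≤ col) (hr : 1 ≤ row) :
    ∀ (k fuel : Nat) (code x y : Int), 1 ≤ x → 1 ≤ y →
      pvIdx col row = pvIdx x y + k → k ≤ fuel →
      pvCodeLoop fuel code x y col row = pvIter k code := by
  intro k
  induction k with
  | zero =>
    intro fuel code x y hx hy hidx _
    have heq : x = col ∧ y = row := pvIdx_inj hx hy hc hr (by omega)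
    unfold pvCodeLoop
    rw [if_pos heq]
    rfl
  | succ n ih =>
    intro fuel code x y hx hy hidx hfuel
    have hne : ¬ (x = col ∧ y = row) := by
      rintro ⟨h1, h2⟩; subst h1; subst h2; omega
    obtain ⟨m, rfl⟩ : ∃ m, fuel = m + 1 := ⟨fuel - 1, by omega⟩
    unfold pvCodeLoop
    rw [if_neg hne]
    show (if y = 1 then pvCodeLoop m (pvNextCode code) 1 (x + 1) col row
          else pvCodeLoop m (pvNextCode code) (x + 1) (y - 1) col row) = _
    by_cases hy1 : y = 1
    · rw [if_pos hy1]
      subst hy1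
      have := pvIdx_step_col x
      exact ih m (pvNextCode code) 1 (x + 1) (by omega) (by omega) (by omega) (by omega)
    · rw [if_neg hy1]
      have := pvIdx_step_diag x y
      exact ih m (pvNextCode code) (x + 1) (y - 1) (by omega) (by omega) (by omega) (by omega)

-- pvIter in closed form (for at least one step).
theorem pvIter_closed : ∀ (k : Nat) (c : Int),
    pvIter (k + 1) c = (c * 252533 ^ (k + 1)) % 33554393 := by
  intro k
  induction k with
  | zero =>
    intro c
    show pvNextCode c = _
    unfold pvNextCode
    rw [pvmodM]
    ring_nf
  | succ n ih =>
    intro c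
    show pvIter (n + 1) (pvNextCode c) = _
    rw [ih (pvNextCode c)]
    unfold pvNextCode
    rw [pvmodM]
    conv_rhs => rw [show c * 252533 ^ (n + 1 + 1) = c * 252533 * 252533 ^ (n + 1) by ring]
    rw [Int.mul_emod (c * 252533 % 33554393), Int.mul_emod (c * 252533) (252533 ^ (n + 1)),
        Int.emod_emod_of_dvd _ (dvd_refl (33554393 : Int))]

-- pvPowMod computes b ^ e % m (for positive m).
theorem pvPowMod_eq (b : Int) (m : Int) (hm : 0 < m) :
    ∀ (e : Nat), pvPowMod b e m = b ^ e % m := by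
  intro e
  induction e using Nat.strong_induction_on with
  | _ e ih =>
    unfold pvPowMod
    by_cases h0 : e = 0
    · subst h0
      simp [PySem.Int.mod_eq_emod_of_pos hm]
    · rw [dif_neg h0]
      have hh : pvPowMod b (e / 2) m = b ^ (e / 2) % m :=
        ih (e / 2) (Nat.div_lt_self (Nat.pos_of_ne_zero h0) (by omega))
      by_cases hpar : e % 2 = 0
      · rw [if_pos hpar, hh, PySem.Int.mod_eq_emod_of_pos hm]
        conv_rhs => rw [show e = e / 2 + e / 2 by omega, pow_add,
          Int.mul_emod (b ^ (e / 2)) (b ^ (e / 2))]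
      · rw [if_neg hpar, hh,
            PySem.Int.mod_eq_emod_of_pos hm, PySem.Int.mod_eq_emod_of_pos hm,
            PySem.Int.mod_eq_emod_of_pos hm]
        conv_rhs => rw [show e = e / 2 + e / 2 + 1 by omega, pow_succ, pow_add,
          Int.mul_emod (b ^ (e / 2) * b ^ (e / 2)) b,
          Int.mul_emod (b ^ (e / 2)) (b ^ (e / 2))]

-- the fuel A's port carries is always enough.
theorem pv_fuel_enough (col row : Int) (hc : 1 ≤ col) (hr : 1 ≤ row) :
    (pvIdx col row - 1).toNat ≤ (col + row).toNat * (col + row).toNat := by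
  have hd := pvIdx_double col row
  have hs : (1 : Int) ≤ col + row := by omega
  have hbound : pvIdx col row - 1 ≤ (col + row) * (col + row) := by nlinarith
  have h1 : ((col + row).toNat * (col + row).toNat : Int) = (col + row) * (col + row) := by
    push_cast [Int.toNat_of_nonneg (by omega : (0:Int) ≤ col + row)]
    ring
  omega

-- ===== VERDICT (by name: the statement is the Claim_ definition above) =====
theorem code_at_spec : Claim_equal_code_at := by
  intro col row _ hpre
  obtain ⟨hc, hr⟩ := hpre
  unfold Spec_code_at code_at code_at_alt
  simp only []
  have hfd : PySem.Int.floordiv ((col + row - 2) * ((col + row - 2) + 1)) 2 + col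
      = pvIdx col row := by
    rw [PySem.Int.floordiv_eq_ediv_of_pos (by norm_num)]
    unfold pvIdx
    ring_nf
  have hidx_pos : 1 ≤ pvIdx col row := by
    have hd := pvIdx_double col row
    have hnn : 0 ≤ (col + row - 2) * (col + row - 1) :=
      mul_nonneg (by omega) (by omega)
    omega
  rw [hfd]
  set k : Nat := (pvIdx col row - 1).toNat with hk
  have hA : pvCodeLoop ((col + row).toNat * (col + row).toNat) 20151125 1 1 col row
      = pvIter k 20151125 := by
    apply pvCodeLoop_eq col row hc hr k _ 20151125 1 1 le_rfl le_rfl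
    · have h11 : pvIdx 1 1 = 1 := by decide
      omega
    · exact pv_fuel_enough col row hc hr
  rw [hA, pvPowMod_eq 252533 33554393 (by norm_num), pvmodM]
  cases hk2 : k with
  | zero =>
    show pvIter 0 20151125 = _
    norm_num [pvIter]
  | succ n =>
    rw [pvIter_closed n 20151125]
    conv_rhs => rw [Int.mul_emod 20151125 (252533 ^ (n + 1) % 33554393),
      Int.emod_emod_of_dvd _ (dvd_refl (33554393 : Int)), ← Int.mul_emod]
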